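-- pv_equiv track=rewrite | github.com/Reneechang17/Leetcode-Solution | 0501-1000/0854. K-Similar Strings.py | kSimilarity
-- ===== SOURCE A (Python) =====
-- from collections import deque
--
-- def kSimilarity(s1: str, s2: str) -> int:
--     if s1 == s2:
--         return 0
--
--     n = len(s1)
--     que = deque([(s1, 0)])
--     vis = set([s1])
--
--     while que:
--         cur, steps = que.popleft()
--
--         i = 0
--         while i < n and cur[i] == s2[i]:
--             i += 1
--
--         # find the pos can match with s2[i]
--         for j in range(i + 1, n):
--             if cur[j] == s2[i] and cur[j] != s2[j]:
--                 next_str = list(cur)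
--                 next_str[i], next_str[j] = next_str[j], next_str[i]
--                 next_str = ''.join(next_str)
--
--                 if next_str == s2:
--                     return steps + 1
--
--                 if next_str not in vis:
--                     vis.add(next_str)
--                     que.append((next_str, steps + 1))
--
--     return -1
-- ===== SOURCE B (Python) =====
-- def kSimilarity(s1: str, s2: str) -> int:
--     n = len(s1)
--
--     def dfs(cur):
--         # cur equals the target: 0 swaps needed
--         if "".join(cur) == s2:
--             return 0
--         i = 0
--         while i < n and cur[i] == s2[i]:
--             i += 1
--         best = None
--         for j in range(i + 1, n):
--             if cur[j] == s2[i] and cur[j] != s2[j]: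
--                 cur[i], cur[j] = cur[j], cur[i]
--                 sub = dfs(cur)
--                 cur[i], cur[j] = cur[j], cur[i]
--                 if sub is not None and (best is None or sub + 1 < best):
--                     best = sub + 1
--         return best
--
--     res = dfs(list(s1))
--     return -1 if res is None else res
-- ===== Notes on version B (the rewrite author's own statement) =====
-- stated objective: alternative
-- what changed: Replaces the BFS over a queue with visited-set by a recursive DFS with backtracking on the mutable character list: at the first mismatching position it tries every legal swap, recurses, undoes the swap, and keeps the minimum, mapping 'no solution' to -1.
-- outside the precondition, e.g. on kSimilarity('ca', 'b'): A returns -1, B returns -1; on kSimilarity('ab', 'a'): A raises IndexError, B raises IndexError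
import Mathlib
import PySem

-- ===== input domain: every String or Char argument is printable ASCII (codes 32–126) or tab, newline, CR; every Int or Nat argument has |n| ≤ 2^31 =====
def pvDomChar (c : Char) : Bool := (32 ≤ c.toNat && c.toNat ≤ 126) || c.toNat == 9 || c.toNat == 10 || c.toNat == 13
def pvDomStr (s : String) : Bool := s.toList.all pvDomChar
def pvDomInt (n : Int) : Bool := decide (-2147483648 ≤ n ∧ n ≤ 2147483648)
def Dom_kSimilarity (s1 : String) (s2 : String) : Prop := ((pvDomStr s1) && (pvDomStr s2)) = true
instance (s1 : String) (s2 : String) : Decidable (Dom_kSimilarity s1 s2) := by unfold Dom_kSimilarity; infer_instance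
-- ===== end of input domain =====

-- B replaces A's BFS (queue + visited set) by a recursive DFS with backtracking that takes the
-- minimum number of swaps over all branches (objective: alternative algorithm, same exponential cost).

-- ===== PORT A =====

-- the `while i < n and cur[i] == s2[i]` scan (identical line in both Python sources)
def pvScan (cur t : List Char) (n : ℕ) (i : ℕ) : ℕ :=
  if _h : i < n then
    if cur.getD i ' ' = t.getD i ' ' then pvScan cur t n (i + 1) else i
  else i
termination_by n - i
decreasing_by omega

-- next_str = list(cur); swap positions i and j; (''.join is done at the use site)
def pvSwap (l : List Char) (i j : ℕ) : List Char :=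
  (l.set i (l.getD j ' ')).set j (l.getD i ' ')

-- the `for j in range(i+1, n)` body of A: may return early (inl) or produce updated queue+vis (inr)
def bfsInner (s2 : String) (t : List Char) (n : ℕ) (cur : List Char) (i steps : ℕ) :
    List ℕ → List (List Char × ℕ) → List (List Char) →
    Sum Int (List (List Char × ℕ) × List (List Char))
  | [], que, vis => .inr (que, vis)
  | j :: js, que, vis =>
    if cur.getD j ' ' = t.getD i ' ' ∧ cur.getD j ' ' ≠ t.getD j ' ' then
      let next := pvSwap cur i j
      if String.ofList next = s2 then .inl ((steps : Int) + 1)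
      else if next ∈ vis then bfsInner s2 t n cur i steps js que vis
      else bfsInner s2 t n cur i steps js (que ++ [(next, steps + 1)]) (PySem.Set.add vis next)
    else bfsInner s2 t n cur i steps js que vis

-- the `while que` loop; fuel only makes the recursion total (provably never exhausted under Pre_)
def bfsLoop (s2 : String) (t : List Char) (n : ℕ) :
    ℕ → List (List Char × ℕ) → List (List Char) → Int
  | 0, _, _ => -1
  | _ + 1, [], _ => -1
  | fuel + 1, (cur, steps) :: rest, vis =>
    let i := pvScan cur t n 0
    match bfsInner s2 t n cur i steps (List.range' (i + 1) (n - (i + 1))) rest vis with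
    | .inl r => r
    | .inr (que', vis') => bfsLoop s2 t n fuel que' vis'

def kSimilarity (s1 : String) (s2 : String) : Int :=
  if s1 = s2 then 0
  else
    bfsLoop s2 s2.toList s1.length (Nat.factorial s1.length + 1)
      [(s1.toList, 0)] (PySem.Set.ofList [s1.toList])

-- ===== PORT B =====

-- `if sub is not None and (best is None or sub + 1 < best): best = sub + 1`
def altUpd (best sub : Option ℕ) : Option ℕ :=
  match sub with
  | none => best
  | some s =>
    match best with
    | none => some (s + 1)
    | some b => if s + 1 < b then some (s + 1) else some b

mutual
-- dfs(cur); fuel only makes the recursion total (n+1 provably suffices: each call lowers the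
-- number of mismatching positions)
def altDfs (s2 : String) (t : List Char) (n : ℕ) (fuel : ℕ) (cur : List Char) : Option ℕ :=
  match fuel with
  | 0 => none
  | fuel + 1 =>
    if String.ofList cur = s2 then some 0
    else
      let i := pvScan cur t n 0
      altFor s2 t n fuel cur i (List.range' (i + 1) (n - (i + 1))) none
termination_by (fuel, 0)

-- the `for j in range(i+1, n)` loop of dfs, threading `best`
def altFor (s2 : String) (t : List Char) (n fuel : ℕ) (cur : List Char) (i : ℕ)
    (js : List ℕ) (best : Option ℕ) : Option ℕ :=
  match js with
  | [] => best
  | j :: js' =>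
    if cur.getD j ' ' = t.getD i ' ' ∧ cur.getD j ' ' ≠ t.getD j ' ' then
      altFor s2 t n fuel cur i js' (altUpd best (altDfs s2 t n fuel (pvSwap cur i j)))
    else altFor s2 t n fuel cur i js' best
termination_by (fuel, js.length + 1)
end

def kSimilarity_alt (s1 : String) (s2 : String) : Int :=
  match altDfs s2 s2.toList s1.length (s1.length + 1) s1.toList with
  | none => -1
  | some k => (k : Int)

-- ===== PRECONDITION & SPEC =====

-- Pre_ excludes inputs with len(s1) > len(s2): on those, scanning s2 past its end can make the
-- Python A raise IndexError (B raises in the same situations; on the excluded inputs where no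
-- scan runs past the end, both A and B return -1).
def Pre_kSimilarity (s1 : String) (s2 : String) : Prop := s1.length ≤ s2.length
instance (s1 : String) (s2 : String) : Decidable (Pre_kSimilarity s1 s2) := by
  unfold Pre_kSimilarity; infer_instance

def pvWitness_kSimilarity : String × String := ("ab", "ba")

def Spec_kSimilarity (s1 : String) (s2 : String) (out : Int) : Prop := out = kSimilarity_alt s1 s2
instance (s1 : String) (s2 : String) (out : Int) : Decidable (Spec_kSimilarity s1 s2 out) := by
  unfold Spec_kSimilarity; infer_instance

-- ===== CLAIM (what is proved, stated in full; the proofs are below) =====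
def Claim_equal_kSimilarity : Prop := ∀ (s1 : String) (s2 : String), Dom_kSimilarity s1 s2 → Pre_kSimilarity s1 s2 → Spec_kSimilarity s1 s2 (kSimilarity s1 s2)

-- ===== LEMMAS AND PROOFS =====

-- ---- getD / set / swap ----

theorem getD_set (l : List Char) (i k : ℕ) (a : Char) :
    (l.set i a).getD k ' ' = if k = i ∧ i < l.length then a else l.getD k ' ' := by
  rw [List.getD_eq_getElem?_getD, List.getD_eq_getElem?_getD, List.getElem?_set]
  split_ifs with h1 h2 h3 h3 <;> simp_all

theorem length_pvSwap (l : List Char) (i j : ℕ) : (pvSwap l i j).length = l.length := by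
  simp [pvSwap]

theorem getD_pvSwap (l : List Char) (i j k : ℕ) (hi : i < l.length) (hj : j < l.length) :
    (pvSwap l i j).getD k ' ' =
      if k = j then l.getD i ' ' else if k = i then l.getD j ' ' else l.getD k ' ' := by
  unfold pvSwap
  rw [getD_set, getD_set]
  simp only [List.length_set]
  split_ifs <;> simp_all

theorem cons_set_perm (l : List Char) (m : ℕ) (a : Char) (hm : m < l.length) :
    (a :: l).Perm (l.getD m ' ' :: l.set m a) := by
  induction l generalizing m with
  | nil => simp at hm
  | cons b tl ih =>
    cases m with
    | zero => simpa using List.Perm.swap b a tl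
    | succ m =>
      simp only [List.getD_cons_succ, List.set_cons_succ]
      have h1 : (a :: b :: tl).Perm (b :: a :: tl) := List.Perm.swap b a tl
      have h2 := (ih m (by simpa using hm)).cons b
      have h3 : (b :: tl.getD m ' ' :: tl.set m a).Perm (tl.getD m ' ' :: b :: tl.set m a) :=
        List.Perm.swap _ _ _
      exact h1.trans (h2.trans h3)

theorem pvSwap_cons (hd : Char) (tl : List Char) (i j : ℕ) :
    pvSwap (hd :: tl) (i + 1) (j + 1) = hd :: pvSwap tl i j := by
  simp [pvSwap]

theorem pvSwap_perm (l : List Char) (i j : ℕ) (hij : i < j) (hj : j < l.length) :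
    (pvSwap l i j).Perm l := by
  induction l generalizing i j with
  | nil => simp at hj
  | cons b tl ih =>
    cases i with
    | zero =>
      cases j with
      | zero => omega
      | succ j =>
        have hjt : j < tl.length := by simpa using hj
        simp only [pvSwap, List.getD_cons_succ, List.getD_cons_zero, List.set_cons_zero,
          List.set_cons_succ]
        exact ((cons_set_perm tl j b hjt).symm)
    | succ i =>
      cases j with
      | zero => omega
      | succ j =>
        rw [pvSwap_cons]
        exact (ih i j (by omega) (by simpa using hj)).cons b

-- ---- the scan ----

theorem pvScan_mismatch (cur t : List Char) (n p : ℕ) (h : pvScan cur t n p < n) :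
    cur.getD (pvScan cur t n p) ' ' ≠ t.getD (pvScan cur t n p) ' ' := by
  fun_induction pvScan cur t n p with
  | case1 i hi heq ih => exact ih h
  | case2 i hi heq => exact heq
  | case3 i hi => omega
-- ---- mismatch count ----

def misN (t cur : List Char) : ℕ :=
  ∑ k ∈ Finset.range cur.length, if cur.getD k ' ' = t.getD k ' ' then 0 else 1

theorem misN_le (t cur : List Char) : misN t cur ≤ cur.length := by
  unfold misN
  calc ∑ k ∈ Finset.range cur.length, (if cur.getD k ' ' = t.getD k ' ' then 0 else 1)
      ≤ ∑ _k ∈ Finset.range cur.length, 1 := by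
        apply Finset.sum_le_sum; intro k _; split_ifs <;> omega
    _ = cur.length := by simp
theorem misN_pvSwap_lt (t cur : List Char) (i j : ℕ) (hij : i < j) (hj : j < cur.length)
    (hmi : cur.getD i ' ' ≠ t.getD i ' ')
    (h1 : cur.getD j ' ' = t.getD i ' ') (h2 : cur.getD j ' ' ≠ t.getD j ' ') :
    misN t (pvSwap cur i j) < misN t cur := by
  have hi : i < cur.length := by omega
  have hlen : (pvSwap cur i j).length = cur.length := length_pvSwap cur i j
  unfold misN
  rw [hlen]
  set g : ℕ → ℕ := fun k => if cur.getD k ' ' = t.getD k ' ' then 0 else 1 with hg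
  set g' : ℕ → ℕ := fun k => if (pvSwap cur i j).getD k ' ' = t.getD k ' ' then 0 else 1 with hg'
  have hiS : i ∈ Finset.range cur.length := Finset.mem_range.mpr hi
  have hjS : j ∈ (Finset.range cur.length).erase i := by
    rw [Finset.mem_erase]; exact ⟨by omega, Finset.mem_range.mpr hj⟩
  have split : ∀ f : ℕ → ℕ, ∑ k ∈ Finset.range cur.length, f k =
      f i + (f j + ∑ k ∈ ((Finset.range cur.length).erase i).erase j, f k) := by
    intro f
    rw [← Finset.add_sum_erase _ f hiS, ← Finset.add_sum_erase _ f hjS]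
  rw [split g, split g']
  have hrest : ∑ k ∈ ((Finset.range cur.length).erase i).erase j, g' k =
      ∑ k ∈ ((Finset.range cur.length).erase i).erase j, g k := by
    apply Finset.sum_congr rfl
    intro k hk
    rw [Finset.mem_erase, Finset.mem_erase] at hk
    simp only [hg, hg', getD_pvSwap cur i j k hi hj, if_neg hk.1, if_neg hk.2.1]
  rw [hrest]
  have e1 : g' i = 0 := by
    simp only [hg', getD_pvSwap cur i j i hi hj, if_neg (by omega : ¬ i = j), if_true]
    rw [if_pos h1]
  have e2 : g i = 1 := by simp only [hg]; rw [if_neg hmi]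
  have e3 : g' j ≤ 1 := by simp only [hg']; split_ifs <;> omega
  have e4 : g j = 1 := by simp only [hg]; rw [if_neg h2]
  omega
-- ---- neighbours ----

def nbrs (t : List Char) (n : ℕ) (cur : List Char) : List (List Char) :=
  (List.range' (pvScan cur t n 0 + 1) (n - (pvScan cur t n 0 + 1))).filterMap
    (fun j => if cur.getD j ' ' = t.getD (pvScan cur t n 0) ' ' ∧ cur.getD j ' ' ≠ t.getD j ' '
              then some (pvSwap cur (pvScan cur t n 0) j) else none)

theorem mem_nbrs (t : List Char) (n : ℕ) (cur v : List Char) :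
    v ∈ nbrs t n cur ↔ ∃ j, pvScan cur t n 0 + 1 ≤ j ∧ j < n ∧
      cur.getD j ' ' = t.getD (pvScan cur t n 0) ' ' ∧ cur.getD j ' ' ≠ t.getD j ' ' ∧
      v = pvSwap cur (pvScan cur t n 0) j := by
  unfold nbrs
  simp only [List.mem_filterMap, List.mem_range'_1]
  constructor
  · rintro ⟨j, ⟨hj1, hj2⟩, hf⟩
    split_ifs at hf with hc
    cases hf
    exact ⟨j, hj1, by omega, hc.1, hc.2, rfl⟩
  · rintro ⟨j, hj1, hj2, hc1, hc2, rfl⟩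
    exact ⟨j, ⟨hj1, by omega⟩, by rw [if_pos ⟨hc1, hc2⟩]⟩
theorem nbrs_perm (t : List Char) (n : ℕ) (cur v : List Char) (hlen : cur.length = n)
    (hv : v ∈ nbrs t n cur) : v.Perm cur := by
  obtain ⟨j, hj1, hj2, _, _, rfl⟩ := (mem_nbrs t n cur v).mp hv
  exact pvSwap_perm cur _ j (by omega) (by omega)
theorem misN_nbrs (t : List Char) (n : ℕ) (cur v : List Char) (hlen : cur.length = n)
    (hv : v ∈ nbrs t n cur) : misN t v < misN t cur := by
  obtain ⟨j, hj1, hj2, hc1, hc2, rfl⟩ := (mem_nbrs t n cur v).mp hv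
  exact misN_pvSwap_lt t cur _ j (by omega) (by omega)
    (pvScan_mismatch cur t n 0 (by omega)) hc1 hc2
theorem nodup_filterMap_of_injOn {α β : Type} (f : α → Option β) :
    ∀ l : List α, l.Nodup →
    (∀ a ∈ l, ∀ a' ∈ l, ∀ b, f a = some b → f a' = some b → a = a') →
    (l.filterMap f).Nodup := by
  intro l
  induction l with
  | nil => intro _ _; simp
  | cons a l ih =>
    intro hnd hinj
    rw [List.nodup_cons] at hnd
    rw [List.filterMap_cons]
    cases hfa : f a with
    | none => exact ih hnd.2 (fun x hx y hy => hinj x (by simp [hx]) y (by simp [hy]))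
    | some b =>
      rw [List.nodup_cons]
      constructor
      · intro hmem
        obtain ⟨a', ha', hfa'⟩ := List.mem_filterMap.mp hmem
        have : a = a' := hinj a (by simp) a' (by simp [ha']) b hfa hfa'
        exact hnd.1 (this ▸ ha')
      · exact ih hnd.2 (fun x hx y hy => hinj x (by simp [hx]) y (by simp [hy]))
theorem nbrs_inj (t : List Char) (n : ℕ) (cur : List Char) (hlen : cur.length = n)
    (j j' : ℕ) (hj : pvScan cur t n 0 + 1 ≤ j) (hjn : j < n)
    (hj' : pvScan cur t n 0 + 1 ≤ j') (hjn' : j' < n)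
    (c1 : cur.getD j ' ' = t.getD (pvScan cur t n 0) ' ') (c2 : cur.getD j ' ' ≠ t.getD j ' ')
    (c1' : cur.getD j' ' ' = t.getD (pvScan cur t n 0) ' ')
    (heq : pvSwap cur (pvScan cur t n 0) j = pvSwap cur (pvScan cur t n 0) j') : j = j' := by
  by_contra hne
  set i := pvScan cur t n 0 with hi
  have hiL : i < cur.length := by omega
  have hjL : j < cur.length := by omega
  have hjL' : j' < cur.length := by omega
  have h0 : (pvSwap cur i j).getD j ' ' = (pvSwap cur i j').getD j ' ' := by rw [heq]
  rw [getD_pvSwap cur i j j hiL hjL, getD_pvSwap cur i j' j hiL hjL'] at h0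
  rw [if_pos rfl, if_neg hne, if_neg (by omega : ¬ j = i)] at h0
  exact pvScan_mismatch cur t n 0 (by omega) (h0.trans c1)
theorem nbrs_nodup (t : List Char) (n : ℕ) (cur : List Char) (hlen : cur.length = n) :
    (nbrs t n cur).Nodup := by
  unfold nbrs
  apply nodup_filterMap_of_injOn
  · exact List.nodup_range'
  · intro a ha b hb v hfa hfb
    rw [List.mem_range'_1] at ha hb
    split_ifs at hfa with hca
    split_ifs at hfb with hcb
    injection hfa with h1
    injection hfb with h2
    exact nbrs_inj t n cur hlen a b ha.1 (by omega) hb.1 (by omega) hca.1 hca.2 hcb.1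
      (h1.trans h2.symm)
-- ---- option-minimum ----

def omin : Option ℕ → Option ℕ → Option ℕ
  | none, b => b
  | some a, none => some a
  | some a, some b => some (min a b)

def listMin (l : List (Option ℕ)) : Option ℕ := l.foldr omin none

theorem omin_none_right (a : Option ℕ) : omin a none = a := by cases a <;> rfl

theorem omin_assoc (a b c : Option ℕ) : omin (omin a b) c = omin a (omin b c) := by
  cases a <;> cases b <;> cases c <;> simp [omin, min_assoc]

theorem altUpd_eq (best sub : Option ℕ) : altUpd best sub = omin best (sub.map (· + 1)) := by
  cases sub with
  | none => cases best <;> rfl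
  | some s =>
    cases best with
    | none => rfl
    | some b => simp only [altUpd, omin, Option.map_some]; split_ifs <;> (congr 1; omega)

theorem listMin_cons (x : Option ℕ) (l : List (Option ℕ)) :
    listMin (x :: l) = omin x (listMin l) := rfl

theorem listMin_append (a b : List (Option ℕ)) :
    listMin (a ++ b) = omin (listMin a) (listMin b) := by
  induction a with
  | nil => rfl
  | cons x a ih => simp [listMin_cons, ih, omin_assoc]

theorem listMin_eq_none_iff (l : List (Option ℕ)) :
    listMin l = none ↔ ∀ x ∈ l, x = none := by
  induction l with
  | nil => simp [listMin]
  | cons x l ih =>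
    rw [listMin_cons]
    cases x with
    | none => simpa [omin] using ih
    | some a => cases h : listMin l <;> simp [omin]
theorem listMin_le_mem (l : List (Option ℕ)) (x : Option ℕ) (hx : x ∈ l) (m : ℕ)
    (hm : x = some m) : ∃ k ≤ m, listMin l = some k := by
  induction l with
  | nil => simp at hx
  | cons y l ih =>
    rw [listMin_cons]
    rcases List.mem_cons.mp hx with rfl | hx'
    · cases h : listMin l with
      | none => exact ⟨m, le_rfl, by simp [hm, omin]⟩
      | some k => exact ⟨min m k, min_le_left _ _, by simp [hm, omin]⟩
    · obtain ⟨k, hk, hlk⟩ := ih hx'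
      cases y with
      | none => exact ⟨k, hk, by simp [omin, hlk]⟩
      | some a => exact ⟨min a k, le_trans (min_le_right _ _) hk, by simp [omin, hlk]⟩
theorem listMin_mem (l : List (Option ℕ)) (m : ℕ) (h : listMin l = some m) :
    some m ∈ l := by
  induction l generalizing m with
  | nil => simp [listMin] at h
  | cons y l ih =>
    rw [listMin_cons] at h
    cases y with
    | none => simp only [omin] at h; exact List.mem_cons_of_mem _ (ih m h)
    | some a =>
      cases hl : listMin l with
      | none => rw [hl] at h; simp [omin] at h; simp [h]
      | some k =>
        rw [hl] at h; simp only [omin, Option.some.injEq] at h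
        rcases Nat.le_total a k with hle | hle
        · rw [min_eq_left hle] at h; simp [h]
        · rw [min_eq_right hle] at h; exact List.mem_cons_of_mem _ (ih m (by rw [hl, ← h]))
theorem listMin_min (l : List (Option ℕ)) (m : ℕ) (h : listMin l = some m) :
    ∀ k, some k ∈ l → m ≤ k := by
  intro k hk
  obtain ⟨k', hk', hlk⟩ := listMin_le_mem l (some k) hk k rfl
  rw [h] at hlk
  cases hlk
  omega
theorem listMin_intro (l : List (Option ℕ)) (m : ℕ) (hmem : some m ∈ l)
    (hmin : ∀ k, some k ∈ l → m ≤ k) : listMin l = some m := by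
  obtain ⟨k, hk, hlk⟩ := listMin_le_mem l (some m) hmem m rfl
  have := hmin k (listMin_mem l k hlk)
  have : k = m := by omega
  rw [hlk, this]
-- ---- fuel irrelevance and the Bellman form of B ----

def Dopt (s2 : String) (t : List Char) (n : ℕ) (cur : List Char) : Option ℕ :=
  altDfs s2 t n (misN t cur + 1) cur

theorem altFor_congr (s2 : String) (t : List Char) (n f1 f2 : ℕ) (cur : List Char) (i : ℕ)
    (js : List ℕ)
    (h : ∀ j ∈ js, (cur.getD j ' ' = t.getD i ' ' ∧ cur.getD j ' ' ≠ t.getD j ' ') →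
      altDfs s2 t n f1 (pvSwap cur i j) = altDfs s2 t n f2 (pvSwap cur i j)) :
    ∀ best, altFor s2 t n f1 cur i js best = altFor s2 t n f2 cur i js best := by
  induction js with
  | nil => intro best; rw [altFor.eq_def, altFor.eq_def]
  | cons j js ih =>
    intro best
    rw [altFor.eq_def (fuel := f1), altFor.eq_def (fuel := f2)]
    simp only []
    split_ifs with hc
    · rw [h j (by simp) hc]
      exact ih (fun j' hj' hc' => h j' (by simp [hj']) hc') _
    · exact ih (fun j' hj' hc' => h j' (by simp [hj']) hc') _
theorem altDfs_fuel (s2 : String) (t : List Char) (n : ℕ) :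
    ∀ M cur f1 f2, misN t cur ≤ M → cur.length = n → misN t cur < f1 → misN t cur < f2 →
    altDfs s2 t n f1 cur = altDfs s2 t n f2 cur := by
  intro M
  induction M using Nat.strong_induction_on with
  | _ M ih =>
    intro cur f1 f2 hM hlen hf1 hf2
    obtain ⟨g1, rfl⟩ : ∃ g1, f1 = g1 + 1 := ⟨f1 - 1, by omega⟩
    obtain ⟨g2, rfl⟩ : ∃ g2, f2 = g2 + 1 := ⟨f2 - 1, by omega⟩
    rw [altDfs.eq_def, altDfs.eq_def]
    simp only []
    split_ifs with htgt
    · rfl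
    · apply altFor_congr
      intro j hj hc
      rw [List.mem_range'_1] at hj
      have hjn : j < n := by omega
      have hij : pvScan cur t n 0 < j := by omega
      have hmi := pvScan_mismatch cur t n 0 (by omega)
      have hlt := misN_pvSwap_lt t cur (pvScan cur t n 0) j hij (by omega) hmi hc.1 hc.2
      have hlswap : (pvSwap cur (pvScan cur t n 0) j).length = n := by
        rw [length_pvSwap, hlen]
      exact ih (misN t (pvSwap cur (pvScan cur t n 0) j)) (by omega) _ g1 g2 le_rfl hlswap
        (by omega) (by omega)
theorem altDfs_eq_Dopt (s2 : String) (t : List Char) (n : ℕ) (cur : List Char) (f : ℕ)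
    (hlen : cur.length = n) (hf : misN t cur < f) :
    altDfs s2 t n f cur = Dopt s2 t n cur := by
  exact altDfs_fuel s2 t n (misN t cur) cur f (misN t cur + 1) le_rfl hlen hf (by omega)

theorem altFor_min (s2 : String) (t : List Char) (n : ℕ) (cur : List Char)
    (hlen : cur.length = n) :
    ∀ js best, (∀ j ∈ js, pvScan cur t n 0 + 1 ≤ j ∧ j < n) →
    altFor s2 t n (misN t cur) cur (pvScan cur t n 0) js best =
      omin best (listMin (js.filterMap (fun j =>
        if cur.getD j ' ' = t.getD (pvScan cur t n 0) ' ' ∧ cur.getD j ' ' ≠ t.getD j ' '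
        then some ((Dopt s2 t n (pvSwap cur (pvScan cur t n 0) j)).map (· + 1)) else none))) := by
  intro js
  induction js with
  | nil => intro best _; rw [altFor.eq_def]; simp [listMin, omin_none_right]
  | cons j js ih =>
    intro best hb
    have hj := hb j (by simp)
    rw [altFor.eq_def]
    simp only [List.filterMap_cons]
    split_ifs with hc
    · have hmi := pvScan_mismatch cur t n 0 (by omega)
      have hlt := misN_pvSwap_lt t cur (pvScan cur t n 0) j (by omega) (by omega) hmi hc.1 hc.2
      have hlswap : (pvSwap cur (pvScan cur t n 0) j).length = n := by
        rw [length_pvSwap, hlen]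
      rw [altDfs_eq_Dopt s2 t n _ _ hlswap hlt, altUpd_eq]
      rw [ih _ (fun j' hj' => hb j' (by simp [hj']))]
      rw [listMin_cons, ← omin_assoc]
    · exact ih _ (fun j' hj' => hb j' (by simp [hj']))

theorem Dopt_bellman (s2 : String) (t : List Char) (n : ℕ) (cur : List Char)
    (hlen : cur.length = n) :
    Dopt s2 t n cur = if String.ofList cur = s2 then some 0
      else listMin ((nbrs t n cur).map (fun v => (Dopt s2 t n v).map (· + 1))) := by
  conv_lhs => rw [Dopt, altDfs.eq_def]
  simp only []
  split_ifs with htgt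
  · rfl
  · rw [altFor_min s2 t n cur hlen _ none
      (fun j hj => by rw [List.mem_range'_1] at hj; omega)]
    have hmap : (nbrs t n cur).map (fun v => (Dopt s2 t n v).map (· + 1)) =
        (List.range' (pvScan cur t n 0 + 1) (n - (pvScan cur t n 0 + 1))).filterMap (fun j =>
          if cur.getD j ' ' = t.getD (pvScan cur t n 0) ' ' ∧ cur.getD j ' ' ≠ t.getD j ' '
          then some ((Dopt s2 t n (pvSwap cur (pvScan cur t n 0) j)).map (· + 1)) else none) := by
      unfold nbrs
      rw [List.map_filterMap]
      apply List.filterMap_congr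
      intro j _
      split_ifs <;> rfl
    rw [hmap]
    rfl
-- ---- distance facts ----

theorem ofList_eq_iff (s2 : String) (cur : List Char) (t : List Char) (ht : t = s2.toList) :
    String.ofList cur = s2 ↔ cur = t := by
  subst ht
  constructor
  · intro h; rw [← h]; simp
  · intro h; rw [h]; simp

theorem Dopt_zero_iff (s2 : String) (t : List Char) (ht : t = s2.toList) (n : ℕ)
    (cur : List Char) (hlen : cur.length = n) :
    Dopt s2 t n cur = some 0 ↔ cur = t := by
  constructor
  · intro h
    by_contra hne
    rw [Dopt_bellman s2 t n cur hlen,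
      if_neg (fun hh => hne ((ofList_eq_iff s2 cur t ht).mp hh))] at h
    have := listMin_mem _ _ h
    obtain ⟨v, _, hv⟩ := List.mem_map.mp this
    cases he : Dopt s2 t n v <;> simp [he] at hv
  · intro h
    rw [Dopt_bellman s2 t n cur hlen, if_pos ((ofList_eq_iff s2 cur t ht).mpr h)]
theorem Dopt_succ (s2 : String) (t : List Char) (ht : t = s2.toList) (n : ℕ)
    (cur : List Char) (hlen : cur.length = n) (hne : cur ≠ t) (e : ℕ)
    (h : Dopt s2 t n cur = some (e + 1)) :
    ∃ v ∈ nbrs t n cur, Dopt s2 t n v = some e := by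
  rw [Dopt_bellman s2 t n cur hlen,
    if_neg (fun hh => hne ((ofList_eq_iff s2 cur t ht).mp hh))] at h
  have := listMin_mem _ _ h
  obtain ⟨v, hv, hveq⟩ := List.mem_map.mp this
  refine ⟨v, hv, ?_⟩
  cases he : Dopt s2 t n v with
  | none => simp [he] at hveq
  | some k => simp [he] at hveq; rw [hveq]
theorem Dopt_one (s2 : String) (t : List Char) (ht : t = s2.toList) (n : ℕ)
    (cur : List Char) (hlen : cur.length = n) (hne : cur ≠ t) (htn : t ∈ nbrs t n cur) :
    Dopt s2 t n cur = some 1 := by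
  have hLt : t.length = n := by rw [(nbrs_perm t n cur t hlen htn).length_eq, hlen]
  have ht0 : Dopt s2 t n t = some 0 := (Dopt_zero_iff s2 t ht n t hLt).mpr rfl
  have helem : (some 1 : Option ℕ) ∈ (nbrs t n cur).map (fun v => (Dopt s2 t n v).map (· + 1)) := by
    apply List.mem_map.mpr
    exact ⟨t, htn, by simp [ht0]⟩
  have hb := Dopt_bellman s2 t n cur hlen
  rw [if_neg (fun hh => hne ((ofList_eq_iff s2 cur t ht).mp hh))] at hb
  obtain ⟨k, hk, hmin⟩ := listMin_le_mem _ _ helem 1 rfl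
  rw [← hb] at hmin
  have : k ≠ 0 := by
    intro h0
    exact hne ((Dopt_zero_iff s2 t ht n cur hlen).mp (by rw [hmin, h0]))
  have : k = 1 := by omega
  rw [hmin, this]
theorem Dopt_le_nbr (s2 : String) (t : List Char) (ht : t = s2.toList) (n : ℕ)
    (cur v : List Char) (hlen : cur.length = n) (hv : v ∈ nbrs t n cur) (e : ℕ)
    (he : Dopt s2 t n v = some e) : ∃ d ≤ e + 1, Dopt s2 t n cur = some d := by
  by_cases hne : cur = t
  · exact ⟨0, by omega, (Dopt_zero_iff s2 t ht n cur hlen).mpr hne⟩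
  · have helem : (some (e+1) : Option ℕ) ∈ (nbrs t n cur).map (fun v => (Dopt s2 t n v).map (· + 1)) :=
      List.mem_map.mpr ⟨v, hv, by simp [he]⟩
    have hb := Dopt_bellman s2 t n cur hlen
    rw [if_neg (fun hh => hne ((ofList_eq_iff s2 cur t ht).mp hh))] at hb
    obtain ⟨k, hk, hmin⟩ := listMin_le_mem _ _ helem (e+1) rfl
    exact ⟨k, hk, by rw [hb, hmin]⟩
theorem Dopt_none (s2 : String) (t : List Char) (ht : t = s2.toList) (n : ℕ)
    (cur : List Char) (hlen : cur.length = n) (hne : cur ≠ t)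
    (h : Dopt s2 t n cur = none) : ∀ v ∈ nbrs t n cur, Dopt s2 t n v = none := by
  intro v hv
  rw [Dopt_bellman s2 t n cur hlen,
    if_neg (fun hh => hne ((ofList_eq_iff s2 cur t ht).mp hh))] at h
  have := (listMin_eq_none_iff _).mp h ((Dopt s2 t n v).map (· + 1))
    (List.mem_map.mpr ⟨v, hv, rfl⟩)
  cases he : Dopt s2 t n v <;> simp [he] at this ⊢
-- ---- the inner loop of A ----

theorem bfsInner_spec (s2 : String) (t : List Char) (ht : t = s2.toList) (n : ℕ)
    (cur : List Char) (i steps : ℕ) :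
    ∀ js : List ℕ, js.Nodup →
    (∀ j ∈ js, ∀ j' ∈ js, j ≠ j' → ∀ v,
      ((if cur.getD j ' ' = t.getD i ' ' ∧ cur.getD j ' ' ≠ t.getD j ' '
        then some (pvSwap cur i j) else none) = some v) →
      ((if cur.getD j' ' ' = t.getD i ' ' ∧ cur.getD j' ' ' ≠ t.getD j' ' '
        then some (pvSwap cur i j') else none) = some v) → False) →
    ∀ que vis,
    (t ∈ js.filterMap (fun j => if cur.getD j ' ' = t.getD i ' ' ∧ cur.getD j ' ' ≠ t.getD j ' '
        then some (pvSwap cur i j) else none) →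
      bfsInner s2 t n cur i steps js que vis = .inl ((steps : Int) + 1)) ∧
    (t ∉ js.filterMap (fun j => if cur.getD j ' ' = t.getD i ' ' ∧ cur.getD j ' ' ≠ t.getD j ' '
        then some (pvSwap cur i j) else none) →
      bfsInner s2 t n cur i steps js que vis =
        .inr (que ++ ((js.filterMap (fun j =>
                if cur.getD j ' ' = t.getD i ' ' ∧ cur.getD j ' ' ≠ t.getD j ' '
                then some (pvSwap cur i j) else none)).filter
                  (fun v => ¬ v ∈ vis)).map (fun v => (v, steps + 1)),
              vis ++ (js.filterMap (fun j =>
                if cur.getD j ' ' = t.getD i ' ' ∧ cur.getD j ' ' ≠ t.getD j ' '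
                then some (pvSwap cur i j) else none)).filter (fun v => ¬ v ∈ vis))) := by
  intro js
  induction js with
  | nil =>
    intro _ _ que vis
    constructor
    · intro h; simp at h
    · intro _; simp [bfsInner]
  | cons j js ih =>
    intro hnd hinj que vis
    obtain ⟨hjmem, hnd'⟩ := List.nodup_cons.mp hnd
    have hinj' := fun a ha b hb => hinj a (List.mem_cons_of_mem j ha) b (List.mem_cons_of_mem j hb)
    by_cases hc : cur.getD j ' ' = t.getD i ' ' ∧ cur.getD j ' ' ≠ t.getD j ' '
    · simp only [List.filterMap_cons, if_pos hc]
      by_cases ht1 : pvSwap cur i j = t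
      · have hs : String.ofList (pvSwap cur i j) = s2 := (ofList_eq_iff s2 _ t ht).mpr ht1
        constructor
        · intro _
          simp only [bfsInner, if_pos hc]
          rw [if_pos hs]
        · intro hnot
          exact absurd (by simp [ht1]) hnot
      · have hs : ¬ String.ofList (pvSwap cur i j) = s2 :=
          fun hh => ht1 ((ofList_eq_iff s2 _ t ht).mp hh)
        by_cases hv : pvSwap cur i j ∈ vis
        · have hstep : bfsInner s2 t n cur i steps (j :: js) que vis =
              bfsInner s2 t n cur i steps js que vis := by
            simp only [bfsInner, if_pos hc, if_neg hs, if_pos hv]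
          obtain ⟨ih1, ih2⟩ := ih hnd' hinj' que vis
          constructor
          · intro hmem
            rcases List.mem_cons.mp hmem with h1 | h1
            · exact absurd h1.symm ht1
            · rw [hstep]; exact ih1 h1
          · intro hnot
            rw [hstep, List.filter_cons,
              if_neg (by simp [hv] : ¬ (decide (¬ pvSwap cur i j ∈ vis) = true))]
            exact ih2 (fun h1 => hnot (List.mem_cons_of_mem _ h1))
        · have hstep : bfsInner s2 t n cur i steps (j :: js) que vis =
              bfsInner s2 t n cur i steps js (que ++ [(pvSwap cur i j, steps + 1)])
                (vis ++ [pvSwap cur i j]) := by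
            simp only [bfsInner, if_pos hc, if_neg hs, if_neg hv]
            rw [PySem.Set.add_of_not_mem hv]
          have hne : ∀ w ∈ js.filterMap (fun j =>
                if cur.getD j ' ' = t.getD i ' ' ∧ cur.getD j ' ' ≠ t.getD j ' '
                then some (pvSwap cur i j) else none), w ≠ pvSwap cur i j := by
            intro w hw heqw
            obtain ⟨j', hj', hfj'⟩ := List.mem_filterMap.mp hw
            exact hinj j (by simp) j' (by simp [hj']) (fun hjj => hjmem (hjj ▸ hj')) w
              (by rw [if_pos hc, heqw]) hfj'
          have hfilt : (js.filterMap (fun j =>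
                if cur.getD j ' ' = t.getD i ' ' ∧ cur.getD j ' ' ≠ t.getD j ' '
                then some (pvSwap cur i j) else none)).filter
                  (fun v => ¬ v ∈ vis ++ [pvSwap cur i j]) =
              (js.filterMap (fun j =>
                if cur.getD j ' ' = t.getD i ' ' ∧ cur.getD j ' ' ≠ t.getD j ' '
                then some (pvSwap cur i j) else none)).filter (fun v => ¬ v ∈ vis) := by
            apply List.filter_congr
            intro w hw
            simp [List.mem_append, hne w hw]
          obtain ⟨ih1, ih2⟩ := ih hnd' hinj' (que ++ [(pvSwap cur i j, steps + 1)])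
            (vis ++ [pvSwap cur i j])
          constructor
          · intro hmem
            rcases List.mem_cons.mp hmem with h1 | h1
            · exact absurd h1.symm ht1
            · rw [hstep]; exact ih1 h1
          · intro hnot
            rw [hstep, ih2 (fun h1 => hnot (List.mem_cons_of_mem _ h1)), hfilt,
              List.filter_cons,
              if_pos (by simp [hv] : decide (¬ pvSwap cur i j ∈ vis) = true)]
            rw [List.map_cons, List.append_assoc, List.append_assoc]
            rfl
    · simp only [List.filterMap_cons, if_neg hc]
      have hstep : bfsInner s2 t n cur i steps (j :: js) que vis =
          bfsInner s2 t n cur i steps js que vis := by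
        simp only [bfsInner, if_neg hc]
      rw [hstep]
      exact ih hnd' hinj' que vis

-- ---- the main BFS correctness ----

def qvals (s2 : String) (t : List Char) (n t0 : ℕ) (xs ys : List (List Char)) :
    List (Option ℕ) :=
  xs.map (fun c => (Dopt s2 t n c).map (t0 + ·)) ++
    ys.map (fun c => (Dopt s2 t n c).map (t0 + 1 + ·))

theorem nodup_length_le (l m : List (List Char)) (h : l.Nodup) (hs : ∀ x ∈ l, x ∈ m) :
    l.length ≤ m.length := by
  have h1 := List.toFinset_card_of_nodup h
  have h2 : l.toFinset ⊆ m.toFinset := by intro x hx; simp at hx ⊢; exact hs x hx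
  have h3 := Finset.card_le_card h2
  have h4 := m.toFinset_card_le
  omega

theorem cover (s2 : String) (t : List Char) (ht : t = s2.toList) (n : ℕ)
    (s1l : List Char) (hs1 : s1l.length = n) (t0 : ℕ)
    (xs' ys vis : List (List Char)) (c : List Char)
    (hvisP : ∀ v ∈ vis, v.Perm s1l)
    (hexp : ∀ v ∈ vis, v ∉ (c :: (xs' ++ ys)) →
      (∀ w ∈ nbrs t n v, w ∈ vis) ∧ t ∉ nbrs t n v)
    (hq : ∀ v ∈ xs' ++ ys, v ∈ vis)
    (htvis : t ∉ vis) :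
    ∀ e v, v ∈ vis → misN t v < misN t c → Dopt s2 t n v = some e →
    ∃ x ∈ qvals s2 t n t0 xs' ys, ∃ k ≤ t0 + 1 + e, x = some k := by
  intro e
  induction e with
  | zero =>
    intro v hvvis hmis hD
    have hvlen : v.length = n := by rw [(hvisP v hvvis).length_eq, hs1]
    have hvt := (Dopt_zero_iff s2 t ht n v hvlen).mp hD
    exact absurd (hvt ▸ hvvis) htvis
  | succ e ihe =>
    intro v hvvis hmis hD
    have hvlen : v.length = n := by rw [(hvisP v hvvis).length_eq, hs1]
    by_cases hqm : v ∈ xs' ++ ys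
    · rcases List.mem_append.mp hqm with hx | hy
      · refine ⟨(Dopt s2 t n v).map (t0 + ·), ?_, t0 + (e + 1), by omega, by simp [hD]⟩
        unfold qvals
        exact List.mem_append_left _ (List.mem_map.mpr ⟨v, hx, rfl⟩)
      · refine ⟨(Dopt s2 t n v).map (t0 + 1 + ·), ?_, t0 + 1 + (e + 1), by omega, by simp [hD]⟩
        unfold qvals
        exact List.mem_append_right _ (List.mem_map.mpr ⟨v, hy, rfl⟩)
    · have hvnotc : v ∉ (c :: (xs' ++ ys)) := by
        intro hmem
        rcases List.mem_cons.mp hmem with heq | h2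
        · subst heq; omega
        · exact hqm h2
      obtain ⟨hnbrsub, htnb⟩ := hexp v hvvis hvnotc
      have hvne : v ≠ t := fun hh => htvis (hh ▸ hvvis)
      obtain ⟨w, hw, hDw⟩ := Dopt_succ s2 t ht n v hvlen hvne e hD
      obtain ⟨x, hx, k, hk, hxk⟩ := ihe w (hnbrsub w hw)
        (lt_trans (misN_nbrs t n v w hvlen hw) hmis) hDw
      exact ⟨x, hx, k, by omega, hxk⟩
theorem qvals_cons (s2 : String) (t : List Char) (n t0 : ℕ) (c : List Char)
    (xs ys : List (List Char)) :
    qvals s2 t n t0 (c :: xs) ys = ((Dopt s2 t n c).map (t0 + ·)) :: qvals s2 t n t0 xs ys := by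
  unfold qvals
  rw [List.map_cons, List.cons_append]

theorem qvals_ge_one (s2 : String) (t : List Char) (ht : t = s2.toList) (n : ℕ)
    (s1l : List Char) (hs1 : s1l.length = n) (t0 : ℕ)
    (xs' ys vis : List (List Char))
    (hvisP : ∀ v ∈ vis, v.Perm s1l)
    (hq : ∀ v ∈ xs' ++ ys, v ∈ vis)
    (htvis : t ∉ vis) :
    ∀ k, some k ∈ qvals s2 t n t0 xs' ys → t0 + 1 ≤ k := by
  intro k hk
  unfold qvals at hk
  have hval : ∀ v ∈ xs' ++ ys, ∀ d, Dopt s2 t n v = some d → 1 ≤ d := by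
    intro v hv d hd
    by_contra hlt
    have hd0 : d = 0 := by omega
    have hvlen : v.length = n := by rw [(hvisP v (hq v hv)).length_eq, hs1]
    have := (Dopt_zero_iff s2 t ht n v hvlen).mp (hd0 ▸ hd)
    exact htvis (this ▸ hq v hv)
  rcases List.mem_append.mp hk with h1 | h1
  · obtain ⟨v, hv, hveq⟩ := List.mem_map.mp h1
    obtain ⟨d, hd, hdk⟩ := Option.map_eq_some_iff.mp hveq
    have := hval v (List.mem_append_left _ hv) d hd
    omega
  · obtain ⟨v, hv, hveq⟩ := List.mem_map.mp h1
    obtain ⟨d, hd, hdk⟩ := Option.map_eq_some_iff.mp hveq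
    have := hval v (List.mem_append_right _ hv) d hd
    omega

theorem key_one (s2 : String) (t : List Char) (ht : t = s2.toList) (n : ℕ)
    (s1l : List Char) (hs1 : s1l.length = n) (t0 : ℕ)
    (xs' ys vis : List (List Char)) (c : List Char)
    (hvisP : ∀ v ∈ vis, v.Perm s1l)
    (hq : ∀ v ∈ xs' ++ ys, v ∈ vis)
    (htvis : t ∉ vis)
    (hcvis : c ∈ vis) (htn : t ∈ nbrs t n c) :
    listMin (qvals s2 t n t0 (c :: xs') ys) = some (t0 + 1) := by
  have hclen : c.length = n := by rw [(hvisP c hcvis).length_eq, hs1]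
  have hcne : c ≠ t := fun hh => htvis (hh ▸ hcvis)
  have hDc := Dopt_one s2 t ht n c hclen hcne htn
  rw [qvals_cons]
  apply listMin_intro
  · simp [hDc]
  · intro k hk
    rcases List.mem_cons.mp hk with h1 | h1
    · simp [hDc] at h1
      omega
    · exact qvals_ge_one s2 t ht n s1l hs1 t0 xs' ys vis hvisP hq htvis k h1

theorem key_min (s2 : String) (t : List Char) (ht : t = s2.toList) (n : ℕ)
    (s1l : List Char) (hs1 : s1l.length = n) (t0 : ℕ)
    (xs' ys vis : List (List Char)) (c : List Char)
    (hvisP : ∀ v ∈ vis, v.Perm s1l)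
    (hexp : ∀ v ∈ vis, v ∉ (c :: (xs' ++ ys)) →
      (∀ w ∈ nbrs t n v, w ∈ vis) ∧ t ∉ nbrs t n v)
    (hq : ∀ v ∈ xs' ++ ys, v ∈ vis)
    (htvis : t ∉ vis)
    (hcvis : c ∈ vis) (htn : t ∉ nbrs t n c) :
    listMin (qvals s2 t n t0 xs' (ys ++ (nbrs t n c).filter (fun v => ¬ v ∈ vis))) =
      listMin (qvals s2 t n t0 (c :: xs') ys) := by
  have hclen : c.length = n := by rw [(hvisP c hcvis).length_eq, hs1]
  have hcne : c ≠ t := fun hh => htvis (hh ▸ hcvis)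
  have hsplit : qvals s2 t n t0 xs' (ys ++ (nbrs t n c).filter (fun v => ¬ v ∈ vis)) =
      qvals s2 t n t0 xs' ys ++ ((nbrs t n c).filter (fun v => ¬ v ∈ vis)).map
        (fun v => (Dopt s2 t n v).map (t0 + 1 + ·)) := by
    unfold qvals
    rw [List.map_append, List.append_assoc]
  rw [hsplit, qvals_cons]
  cases hDc : Dopt s2 t n c with
  | none =>
    have hnews_none : ∀ x ∈ ((nbrs t n c).filter (fun v => ¬ v ∈ vis)).map
        (fun v => (Dopt s2 t n v).map (t0 + 1 + ·)), x = none := by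
      intro x hx
      obtain ⟨v, hv, rfl⟩ := List.mem_map.mp hx
      have hvn := Dopt_none s2 t ht n c hclen hcne hDc v (List.mem_of_mem_filter hv)
      simp [hvn]
    rw [listMin_append, (listMin_eq_none_iff _).mpr hnews_none, omin_none_right,
      listMin_cons]
    simp [omin]
  | some dc =>
    have hdc0 : dc ≠ 0 := by
      intro h0
      exact hcne ((Dopt_zero_iff s2 t ht n c hclen).mp (h0 ▸ hDc))
    have hdc1 : dc ≠ 1 := by
      intro h1
      obtain ⟨w, hw, hDw⟩ := Dopt_succ s2 t ht n c hclen hcne 0 (by rw [hDc, h1])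
      have hwlen : w.length = n := by rw [(nbrs_perm t n c w hclen hw).length_eq, hclen]
      exact htn ((Dopt_zero_iff s2 t ht n w hwlen).mp hDw ▸ hw)
    simp only [Option.map_some]
    obtain ⟨m, hmle, hmeq⟩ := listMin_le_mem
      ((some (t0 + dc)) :: qvals s2 t n t0 xs' ys)
      (some (t0 + dc)) List.mem_cons_self (t0 + dc) rfl
    have hmem_old := listMin_mem _ _ hmeq
    have hmin_old := listMin_min _ _ hmeq
    rw [hmeq]
    apply listMin_intro
    · -- membership of some m in the new list
      rcases List.mem_cons.mp hmem_old with h1 | h1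
      · -- the minimum was achieved (only) at c itself
        have hm : m = t0 + dc := by cases h1; rfl
        obtain ⟨e', rfl⟩ : ∃ e', dc = e' + 1 := ⟨dc - 1, by omega⟩
        obtain ⟨w, hw, hDw⟩ := Dopt_succ s2 t ht n c hclen hcne e' (by rw [hDc])
        by_cases hwv : w ∈ vis
        · obtain ⟨x, hx, k, hk, hxk⟩ := cover s2 t ht n s1l hs1 t0 xs' ys vis c hvisP hexp hq
            htvis e' w hwv (misN_nbrs t n c w hclen hw) hDw
          have hmk := hmin_old k (List.mem_cons_of_mem _ (hxk ▸ hx))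
          have : k = m := by omega
          subst this
          exact List.mem_append_left _ (hxk ▸ hx)
        · apply List.mem_append_right
          apply List.mem_map.mpr
          refine ⟨w, List.mem_filter.mpr ⟨hw, by simpa using hwv⟩, ?_⟩
          rw [hDw]
          simp [hm]
          omega
      · exact List.mem_append_left _ h1
    · -- minimality over the new list
      intro k hk
      rcases List.mem_append.mp hk with h1 | h1
      · exact hmin_old k (List.mem_cons_of_mem _ h1)
      · obtain ⟨v, hv, hveq⟩ := List.mem_map.mp h1
        obtain ⟨e, he, hek⟩ := Option.map_eq_some_iff.mp hveq
        obtain ⟨d, hd, hDd⟩ := Dopt_le_nbr s2 t ht n c v hclen (List.mem_of_mem_filter hv) e he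
        rw [hDc] at hDd
        have : d = dc := by cases hDd; rfl
        omega

theorem bfs_main (s2 : String) (t : List Char) (ht : t = s2.toList) (n : ℕ)
    (s1l : List Char) (hs1 : s1l.length = n) :
    ∀ fuel t0 xs ys vis,
    (∀ c ∈ xs ++ ys, c ∈ vis) →
    t ∉ vis →
    (∀ v ∈ vis, v ∉ xs ++ ys → (∀ w ∈ nbrs t n v, w ∈ vis) ∧ t ∉ nbrs t n v) →
    vis.Nodup → (∀ v ∈ vis, v.Perm s1l) →
    xs.length + ys.length + (Nat.factorial n - vis.length) < fuel →
    (xs = [] → ys = []) →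
    bfsLoop s2 t n fuel (xs.map (fun c => (c, t0)) ++ ys.map (fun c => (c, t0 + 1))) vis
      = match listMin (qvals s2 t n t0 xs ys) with
        | none => -1
        | some m => (m : Int) := by
  intro fuel
  induction fuel with
  | zero =>
    intro t0 xs ys vis _ _ _ _ _ hfuel _
    omega
  | succ fuel ih =>
    intro t0 xs ys vis hqvis htvis hexp hvnd hvisP hfuel hnorm
    cases xs with
    | nil =>
      rw [hnorm rfl]
      simp only [List.map_nil, List.nil_append]
      rw [bfsLoop]
      unfold qvals
      simp [listMin]
    | cons c xs' =>
      have hcvis : c ∈ vis := hqvis c (by simp)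
      have hcperm : c.Perm s1l := hvisP c hcvis
      have hclen : c.length = n := by rw [hcperm.length_eq, hs1]
      have hcne : c ≠ t := fun hh => htvis (hh ▸ hcvis)
      simp only [List.map_cons, List.cons_append]
      rw [bfsLoop]
      have hjsnd : (List.range' (pvScan c t n 0 + 1) (n - (pvScan c t n 0 + 1))).Nodup :=
        List.nodup_range'
      have hinj : ∀ j ∈ List.range' (pvScan c t n 0 + 1) (n - (pvScan c t n 0 + 1)),
          ∀ j' ∈ List.range' (pvScan c t n 0 + 1) (n - (pvScan c t n 0 + 1)), j ≠ j' → ∀ v,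
          ((if c.getD j ' ' = t.getD (pvScan c t n 0) ' ' ∧ c.getD j ' ' ≠ t.getD j ' '
            then some (pvSwap c (pvScan c t n 0) j) else none) = some v) →
          ((if c.getD j' ' ' = t.getD (pvScan c t n 0) ' ' ∧ c.getD j' ' ' ≠ t.getD j' ' '
            then some (pvSwap c (pvScan c t n 0) j') else none) = some v) → False := by
        intro a ha b hb hne v hfa hfb
        rw [List.mem_range'_1] at ha hb
        split_ifs at hfa with hca
        split_ifs at hfb with hcb
        injection hfa with h1
        injection hfb with h2
        exact hne (nbrs_inj t n c hclen a b ha.1 (by omega) hb.1 (by omega) hca.1 hca.2 hcb.1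
          (h1.trans h2.symm))
      obtain ⟨hinl, hinr⟩ := bfsInner_spec s2 t ht n c (pvScan c t n 0) t0 _ hjsnd hinj
        (xs'.map (fun c => (c, t0)) ++ ys.map (fun c => (c, t0 + 1))) vis
      have hnbrs_eq : (List.range' (pvScan c t n 0 + 1) (n - (pvScan c t n 0 + 1))).filterMap
          (fun j => if c.getD j ' ' = t.getD (pvScan c t n 0) ' ' ∧ c.getD j ' ' ≠ t.getD j ' '
            then some (pvSwap c (pvScan c t n 0) j) else none) = nbrs t n c := rfl
      rw [hnbrs_eq] at hinl hinr
      by_cases htn : t ∈ nbrs t n c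
      · rw [hinl htn]
        change ((t0 : Int) + 1) = _
        rw [key_one s2 t ht n s1l hs1 t0 xs' ys vis c hvisP
          (fun v hv => hqvis v (by rw [List.cons_append]; exact List.mem_cons_of_mem _ hv))
          htvis hcvis htn]
        push_cast
        ring
      · rw [hinr htn]
        change bfsLoop s2 t n fuel _ _ = _
        set news := (nbrs t n c).filter (fun v => ¬ v ∈ vis) with hnews
        have hnews_sub : ∀ v ∈ news, v ∈ nbrs t n c := fun v hv => List.mem_of_mem_filter hv
        have hnews_notvis : ∀ v ∈ news, v ∉ vis := by
          intro v hv
          have := (List.mem_filter.mp hv).2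
          simpa using this
        have hnews_perm : ∀ v ∈ news, v.Perm s1l :=
          fun v hv => (nbrs_perm t n c v hclen (hnews_sub v hv)).trans hcperm
        have hnews_nd : news.Nodup := (nbrs_nodup t n c hclen).filter _
        have hqvis' : ∀ v ∈ xs' ++ (ys ++ news), v ∈ vis ++ news := by
          intro v hv
          rw [List.mem_append] at hv ⊢
          rcases hv with h1 | h1
          · exact Or.inl (hqvis v (by
              rw [List.cons_append]
              exact List.mem_cons_of_mem _ (List.mem_append_left _ h1)))
          · rcases List.mem_append.mp h1 with h2 | h2
            · exact Or.inl (hqvis v (by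
                rw [List.cons_append]
                exact List.mem_cons_of_mem _ (List.mem_append_right _ h2)))
            · exact Or.inr h2
        have htvis' : t ∉ vis ++ news := by
          rw [List.mem_append]
          rintro (h1 | h1)
          · exact htvis h1
          · exact htn (hnews_sub t h1)
        have hexp' : ∀ v ∈ vis ++ news, v ∉ xs' ++ (ys ++ news) →
            (∀ w ∈ nbrs t n v, w ∈ vis ++ news) ∧ t ∉ nbrs t n v := by
          intro v hv hvnot
          rcases List.mem_append.mp hv with hvv | hvnews
          · by_cases hvc : v = c
            · subst hvc
              refine ⟨fun w hw => ?_, htn⟩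
              rw [List.mem_append]
              by_cases hwv : w ∈ vis
              · exact Or.inl hwv
              · exact Or.inr (List.mem_filter.mpr ⟨hw, by simpa using hwv⟩)
            · have hnot2 : v ∉ (c :: xs') ++ ys := by
                rw [List.cons_append, List.mem_cons]
                rintro (h1 | h1)
                · exact hvc h1
                · rcases List.mem_append.mp h1 with h2 | h2
                  · exact hvnot (List.mem_append_left _ h2)
                  · exact hvnot (List.mem_append_right _ (List.mem_append_left _ h2))
              obtain ⟨hsub, htnb⟩ := hexp v hvv hnot2
              exact ⟨fun w hw => List.mem_append_left _ (hsub w hw), htnb⟩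
          · exact absurd (List.mem_append_right _ (List.mem_append_right _ hvnews)) hvnot
        have hvnd' : (vis ++ news).Nodup := by
          rw [List.nodup_append]
          refine ⟨hvnd, hnews_nd, ?_⟩
          intro a ha b hb heq
          exact hnews_notvis b hb (heq ▸ ha)
        have hvisP' : ∀ v ∈ vis ++ news, v.Perm s1l := by
          intro v hv
          rcases List.mem_append.mp hv with h1 | h1
          · exact hvisP v h1
          · exact hnews_perm v h1
        have hlenb : (vis ++ news).length ≤ Nat.factorial n := by
          have hsub : ∀ x ∈ vis ++ news, x ∈ s1l.permutations :=
            fun x hx => List.mem_permutations.mpr (hvisP' x hx)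
          have := nodup_length_le (vis ++ news) s1l.permutations hvnd' hsub
          rwa [List.length_permutations, hs1] at this
        have hfuel' : xs'.length + (ys ++ news).length +
            (Nat.factorial n - (vis ++ news).length) < fuel := by
          simp only [List.length_cons, List.length_append] at hfuel hlenb ⊢
          omega
        have hkey := key_min s2 t ht n s1l hs1 t0 xs' ys vis c hvisP
          (fun v hv hnot => hexp v hv (by rw [List.cons_append]; exact hnot))
          (fun v hv => hqvis v (by rw [List.cons_append]; exact List.mem_cons_of_mem _ hv))
          htvis hcvis htn
        rw [List.append_assoc, ← List.map_append]
        by_cases hxs : xs' = []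
        · subst hxs
          simp only [List.map_nil, List.nil_append]
          have hshape : (ys ++ news).map (fun c => (c, t0 + 1)) =
              (ys ++ news).map (fun c => (c, t0 + 1)) ++
                ([] : List (List Char)).map (fun c => (c, t0 + 1 + 1)) := by simp
          rw [hshape]
          rw [ih (t0 + 1) (ys ++ news) [] (vis ++ news)
            (by simpa using hqvis') htvis' (by simpa using hexp') hvnd' hvisP'
            (by simpa using hfuel') (fun _ => rfl)]
          have hq2 : qvals s2 t n (t0 + 1) (ys ++ news) [] =
              qvals s2 t n t0 [] (ys ++ news) := by
            unfold qvals
            simp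
          rw [hq2, hkey]
        · rw [ih t0 xs' (ys ++ news) (vis ++ news) hqvis' htvis' hexp' hvnd' hvisP' hfuel'
            (fun h => absurd h hxs)]
          rw [hkey]
-- ===== VERDICT (by name: the statement is the Claim_ definition above) =====
theorem kSimilarity_spec : Claim_equal_kSimilarity := by
  intro s1 s2 _dom hpre
  unfold Spec_kSimilarity kSimilarity kSimilarity_alt
  by_cases heq : s1 = s2
  · rw [if_pos heq]
    have hB : altDfs s2 s2.toList s1.length (s1.length + 1) s1.toList = some 0 := by
      rw [altDfs.eq_def]
      simp only []
      rw [if_pos (by rw [String.ofList_toList, heq])]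
    rw [hB]
    rfl
  · rw [if_neg heq]
    have hs1len : s1.toList.length = s1.length := by simp
    have hnt : s1.length ≤ s2.toList.length := by simpa using hpre
    have hs1lne : s1.toList ≠ s2.toList := by
      intro hh
      apply heq
      have := congrArg String.ofList hh
      rwa [String.ofList_toList, String.ofList_toList] at this
    have hvis : PySem.Set.ofList [s1.toList] = [s1.toList] := rfl
    have hmain := bfs_main s2 s2.toList rfl s1.length s1.toList hs1len
      (Nat.factorial s1.length + 1) 0 [s1.toList] [] [s1.toList]
      (by intro c hc; simpa using hc)
      (by simp; exact fun hh => hs1lne hh.symm)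
      (by intro v hv hnot; exact absurd (by simpa using hv) hnot)
      (by simp)
      (by intro v hv; simp at hv; subst hv; exact List.Perm.refl _)
      (by have := Nat.factorial_pos s1.length; simp; omega)
      (by intro h; simp at h)
    simp only [List.map_cons, List.map_nil, List.append_nil] at hmain
    rw [hvis, hmain]
    have hq : listMin (qvals s2 s2.toList s1.length 0 [s1.toList] []) =
        Dopt s2 s2.toList s1.length s1.toList := by
      unfold qvals
      cases hD : Dopt s2 s2.toList s1.length s1.toList <;>
        simp [hD, listMin, omin_none_right, omin]
    have hB : altDfs s2 s2.toList s1.length (s1.length + 1) s1.toList =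
        Dopt s2 s2.toList s1.length s1.toList := by
      apply altDfs_eq_Dopt
      · exact hs1len
      · have := misN_le s2.toList s1.toList
        omega
    rw [hq, hB]
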